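-- pv_equiv track=rewrite | github.com/voaiutersna/KMITL-LAB-DSA | Practive/digitSumRecursive.py | digitSumRecursive02
-- ===== SOURCE A (Python) =====
-- def digitSumRecursive02(inp,l):
--     #base case
--     if l == len(inp):
--         return 0
--     #process
--     digit = int(inp[l])
--     if digit % 2:
--         #recur
--         return -digit + digitSumRecursive02(inp,l+1)
--     else:
--         #recur
--         return digit + digitSumRecursive02(inp,l+1)
-- ===== SOURCE B (Python) =====
-- def digitSumRecursive02(inp, l):
--     # pass 1: collect the characters the scan visits (same indexing as A, so the
--     # same inputs raise IndexError)
--     chars = []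
--     while l != len(inp):
--         chars.append(inp[l])
--         l += 1
--     # pass 2: signed digit sum (int() raises ValueError on non-digits, as in A)
--     return sum(d if d % 2 == 0 else -d for d in map(int, chars))
-- ===== Notes on version B (the rewrite author's own statement) =====
-- stated objective: alternative
-- what changed: Replaces the inline signed-sum recursion with two staged passes: a loop that only collects the visited characters (same indexing, so the same inputs raise), then a map/sum comprehension applying int() and the even/odd sign in a second pass.
import Mathlib
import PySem

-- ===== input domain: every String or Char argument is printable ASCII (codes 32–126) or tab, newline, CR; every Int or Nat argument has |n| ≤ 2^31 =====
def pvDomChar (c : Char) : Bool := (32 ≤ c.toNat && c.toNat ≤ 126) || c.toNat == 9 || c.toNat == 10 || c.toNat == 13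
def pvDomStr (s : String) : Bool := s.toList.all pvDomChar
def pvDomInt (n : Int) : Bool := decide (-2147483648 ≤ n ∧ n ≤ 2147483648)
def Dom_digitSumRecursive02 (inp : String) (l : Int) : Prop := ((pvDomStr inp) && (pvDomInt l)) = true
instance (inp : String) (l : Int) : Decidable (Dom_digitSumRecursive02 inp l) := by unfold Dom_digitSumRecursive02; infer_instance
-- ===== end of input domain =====

-- B replaces A's signed-sum recursion by two staged passes: a loop that only collects the
-- visited characters, then a map/sum over their signed digit values; return values are
-- identical on all inputs where A returns.

-- ===== PORT A =====
-- Literal port of A's recursion.  Where the Python raises (IndexError: inp[l] out of range,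
-- ValueError: int() on a non-digit character) the port returns 0; such inputs are outside Pre_.
def digitSumRecursive02 (inp : String) (l : Int) : Int :=
  if l = (inp.toList.length : Int) then 0
  else
    match h : PySem.List.pyGet? inp.toList l with
    | none => 0  -- IndexError in Python; excluded by Pre_
    | some c =>
      match PySem.Int.ofChars? [c] with
      | none => 0  -- ValueError in Python; excluded by Pre_
      | some digit =>
        if PySem.Int.mod digit 2 ≠ 0 then -digit + digitSumRecursive02 inp (l + 1)
        else digit + digitSumRecursive02 inp (l + 1)
termination_by ((inp.toList.length : Int) - l).toNat
decreasing_by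
  all_goals
    have hin : PySem.Raise.InRange inp.toList.length l := by
      by_contra hc
      rw [← PySem.List.pyGet?_eq_none_iff] at hc
      simp [hc] at h
    obtain ⟨_, h2⟩ := hin
    omega

-- ===== PORT B =====
-- Pass 1 of Source B: `chars = []; while l != len(inp): chars.append(inp[l]); l += 1`.
def pvChars (inp : String) (l : Int) : List Char :=
  if l = (inp.toList.length : Int) then []
  else
    match h : PySem.List.pyGet? inp.toList l with
    | none => []  -- IndexError in Python; excluded by Pre_
    | some c => c :: pvChars inp (l + 1)
termination_by ((inp.toList.length : Int) - l).toNat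
decreasing_by
  have hin : PySem.Raise.InRange inp.toList.length l := by
    by_contra hc
    rw [← PySem.List.pyGet?_eq_none_iff] at hc
    simp [hc] at h
  obtain ⟨_, h2⟩ := hin
  omega

-- Pass 2 of Source B: `d if d % 2 == 0 else -d` for one character `int(c)`; 0 stands for Python's
-- ValueError on a non-digit character (excluded by Pre_).
def pvSign (c : Char) : Int :=
  match PySem.Int.ofChars? [c] with
  | none => 0
  | some d => if PySem.Int.mod d 2 = 0 then d else -d

def digitSumRecursive02_alt (inp : String) (l : Int) : Int :=
  ((pvChars inp l).map pvSign).sum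

-- ===== PRECONDITION & SPEC =====
-- Exactly the inputs on which the Python A returns: either 0 ≤ l ≤ len(inp) and every character
-- from position l on is a decimal digit, or -len(inp) ≤ l < 0 (Python's negative indexing wraps,
-- then the scan continues past the end of the string and over the whole string again) and every
-- character of inp is a decimal digit.  Elsewhere A raises IndexError or ValueError.
def Pre_digitSumRecursive02 (inp : String) (l : Int) : Prop :=
  (0 ≤ l ∧ l ≤ (inp.toList.length : Int) ∧ (inp.toList.drop l.toNat).all Char.isDigit = true)
  ∨ (-(inp.toList.length : Int) ≤ l ∧ l < 0 ∧ inp.toList.all Char.isDigit = true)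
instance (inp : String) (l : Int) : Decidable (Pre_digitSumRecursive02 inp l) := by
  unfold Pre_digitSumRecursive02; infer_instance

def pvWitness_digitSumRecursive02 : String × Int := ("2479", 0)

def Spec_digitSumRecursive02 (inp : String) (l : Int) (out : Int) : Prop := out = digitSumRecursive02_alt inp l
instance (inp : String) (l : Int) (out : Int) : Decidable (Spec_digitSumRecursive02 inp l out) := by unfold Spec_digitSumRecursive02; infer_instance

-- ===== CLAIM (what is proved, stated in full; the proofs are below) =====
def Claim_equal_digitSumRecursive02 : Prop := ∀ (inp : String) (l : Int), Dom_digitSumRecursive02 inp l → Pre_digitSumRecursive02 inp l → Spec_digitSumRecursive02 inp l (digitSumRecursive02 inp l)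

-- ===== LEMMAS AND PROOFS =====

-- int('d') succeeds on an ASCII digit and returns its value.
lemma parse_digit (c : Char) (h : c.isDigit = true) :
    PySem.Int.ofChars? [c] = some ((c.toNat : Int) - 48) := by
  have h1 : 48 ≤ c.toNat ∧ c.toNat ≤ 57 := by
    simp only [Char.isDigit, decide_eq_true_eq, Bool.and_eq_true] at h
    exact ⟨UInt32.le_iff_toNat_le.mp h.1, UInt32.le_iff_toNat_le.mp h.2⟩
  have hc : c = Char.ofNat c.toNat := by rw [Char.ofNat_toNat]
  rw [hc]
  obtain ⟨ha, hb⟩ := h1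
  interval_cases (c.toNat) <;> decide

-- Forward scan: from a nonnegative index over all-digit characters, A's recursion computes
-- the signed-digit sum of the dropped suffix.
lemma recA_nonneg (inp : String) (k : Nat) (hk : k ≤ inp.toList.length)
    (hall : (inp.toList.drop k).all Char.isDigit = true) :
    digitSumRecursive02 inp (k : Int) = ((inp.toList.drop k).map pvSign).sum := by
  generalize hn : inp.toList.length - k = n
  induction n generalizing k with
  | zero =>
    have hkl : inp.toList.length ≤ k := by omega
    rw [digitSumRecursive02.eq_def, if_pos (by omega), List.drop_eq_nil_of_le hkl]
    simp
  | succ n ih =>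
    have hlt : k < inp.toList.length := by omega
    have hdrop : inp.toList.drop k = inp.toList[k] :: inp.toList.drop (k + 1) :=
      List.drop_eq_getElem_cons hlt
    rw [hdrop] at hall ⊢
    simp only [List.all_cons, Bool.and_eq_true] at hall
    have hd : PySem.Int.ofChars? [inp.toList[k]] =
        some ((inp.toList[k].toNat : Int) - 48) := parse_digit _ hall.1
    have hget : PySem.List.pyGet? inp.toList (k : Int) = some inp.toList[k] := by
      rw [PySem.List.pyGet?_natCast]
      exact List.getElem?_eq_getElem hlt
    rw [digitSumRecursive02.eq_def]
    rw [if_neg (by omega : ¬ ((k:Int) = (inp.toList.length : Int)))]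
    rw [hget]
    simp only [hd]
    have hcast : (k : Int) + 1 = ((k + 1 : Nat) : Int) := by push_cast; ring
    rw [hcast, ih (k + 1) (by omega) hall.2 (by omega)]
    simp only [List.map_cons, List.sum_cons, pvSign, hd]
    by_cases hm : PySem.Int.mod ((inp.toList[k].toNat : Int) - 48) 2 = 0
    · rw [if_neg (by simpa using hm), if_pos hm]
    · rw [if_pos hm, if_neg hm]

-- Backward wrap: from a negative in-range index over an all-digit string, A's recursion
-- computes the signed-digit sum of the last k characters plus the scan from 0.
lemma recA_neg (inp : String) (k : Nat) (hk : k ≤ inp.toList.length)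
    (hall : inp.toList.all Char.isDigit = true) :
    digitSumRecursive02 inp (-(k : Int)) =
      ((inp.toList.drop (inp.toList.length - k)).map pvSign).sum + digitSumRecursive02 inp 0 := by
  induction k with
  | zero =>
    have h1 : inp.toList.drop (inp.toList.length - 0) = [] := List.drop_eq_nil_of_le (by omega)
    rw [h1]
    norm_num
  | succ k ih =>
    have hlt : inp.toList.length - (k + 1) < inp.toList.length := by omega
    have hdrop : inp.toList.drop (inp.toList.length - (k + 1)) =
        inp.toList[inp.toList.length - (k + 1)] :: inp.toList.drop (inp.toList.length - k) := by
      have h := List.drop_eq_getElem_cons hlt (l := inp.toList)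
      rwa [show inp.toList.length - (k + 1) + 1 = inp.toList.length - k by omega] at h
    have hcdig : inp.toList[inp.toList.length - (k + 1)].isDigit = true := by
      rw [List.all_eq_true] at hall
      exact hall _ (List.getElem_mem hlt)
    have hd := parse_digit _ hcdig
    have hget : PySem.List.pyGet? inp.toList (-((k + 1 : Nat) : Int)) =
        some inp.toList[inp.toList.length - (k + 1)] := by
      rw [PySem.List.pyGet?_neg_natCast inp.toList (k+1) (by omega) hk]
      exact List.getElem?_eq_getElem hlt
    rw [digitSumRecursive02.eq_def]
    rw [if_neg (by omega : ¬ (-((k + 1 : Nat) : Int) = (inp.toList.length : Int)))]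
    rw [hget]
    simp only [hd]
    have hcast : -((k + 1 : Nat) : Int) + 1 = -(k : Int) := by push_cast; ring
    rw [hcast, ih (by omega)]
    rw [hdrop]
    simp only [List.map_cons, List.sum_cons, pvSign, hd]
    by_cases hm : PySem.Int.mod ((inp.toList[inp.toList.length - (k + 1)].toNat : Int) - 48) 2 = 0
    · rw [if_neg (by simpa using hm), if_pos hm]
      ring
    · rw [if_pos hm, if_neg hm]
      ring

-- Pass 1 collects exactly the dropped suffix from a nonnegative in-range index.
lemma chars_nonneg (inp : String) (k : Nat) (hk : k ≤ inp.toList.length) :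
    pvChars inp (k : Int) = inp.toList.drop k := by
  generalize hn : inp.toList.length - k = n
  induction n generalizing k with
  | zero =>
    have hkl : inp.toList.length ≤ k := by omega
    rw [pvChars.eq_def, if_pos (by omega), List.drop_eq_nil_of_le hkl]
  | succ n ih =>
    have hlt : k < inp.toList.length := by omega
    have hget : PySem.List.pyGet? inp.toList (k : Int) = some inp.toList[k] := by
      rw [PySem.List.pyGet?_natCast]
      exact List.getElem?_eq_getElem hlt
    rw [pvChars.eq_def]
    rw [if_neg (by omega : ¬ ((k:Int) = (inp.toList.length : Int)))]
    rw [hget]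
    have hcast : (k : Int) + 1 = ((k + 1 : Nat) : Int) := by push_cast; ring
    rw [hcast, ih (k + 1) (by omega) (by omega), List.drop_eq_getElem_cons hlt]

-- Pass 1 from a negative in-range index: the last k characters, then the whole string.
lemma chars_neg (inp : String) (k : Nat) (hk : k ≤ inp.toList.length) :
    pvChars inp (-(k : Int)) = inp.toList.drop (inp.toList.length - k) ++ pvChars inp 0 := by
  induction k with
  | zero =>
    rw [List.drop_eq_nil_of_le (by omega)]
    norm_num
  | succ k ih =>
    have hlt : inp.toList.length - (k + 1) < inp.toList.length := by omega
    have hdrop : inp.toList.drop (inp.toList.length - (k + 1)) =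
        inp.toList[inp.toList.length - (k + 1)] :: inp.toList.drop (inp.toList.length - k) := by
      have h := List.drop_eq_getElem_cons hlt (l := inp.toList)
      rwa [show inp.toList.length - (k + 1) + 1 = inp.toList.length - k by omega] at h
    have hget : PySem.List.pyGet? inp.toList (-((k + 1 : Nat) : Int)) =
        some inp.toList[inp.toList.length - (k + 1)] := by
      rw [PySem.List.pyGet?_neg_natCast inp.toList (k+1) (by omega) hk]
      exact List.getElem?_eq_getElem hlt
    rw [pvChars.eq_def]
    rw [if_neg (by omega : ¬ (-((k + 1 : Nat) : Int) = (inp.toList.length : Int)))]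
    rw [hget]
    have hcast : -((k + 1 : Nat) : Int) + 1 = -(k : Int) := by push_cast; ring
    rw [hcast, ih (by omega), hdrop, List.cons_append]

-- ===== VERDICT (by name: the statement is the Claim_ definition above) =====
theorem digitSumRecursive02_spec : Claim_equal_digitSumRecursive02 := by
  intro inp l _ hpre
  unfold Spec_digitSumRecursive02 digitSumRecursive02_alt
  rcases hpre with ⟨h0, hle, hall⟩ | ⟨hge, hlt, hall⟩
  · have hl : l = ((l.toNat : Nat) : Int) := (Int.toNat_of_nonneg h0).symm
    rw [hl, chars_nonneg inp l.toNat (by omega)]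
    exact recA_nonneg inp l.toNat (by omega) hall
  · have hk1 : 0 < (-l).toNat := by omega
    have hk2 : (-l).toNat ≤ inp.toList.length := by omega
    have hlk : l = -(((-l).toNat : Nat) : Int) := by omega
    have hc0 : pvChars inp 0 = inp.toList := by
      have h := chars_nonneg inp 0 (by omega)
      simpa using h
    rw [hlk, chars_neg inp _ hk2, List.map_append, List.sum_append,
      recA_neg inp _ hk2 hall, hc0]
    have h0 : digitSumRecursive02 inp 0 = (inp.toList.map pvSign).sum := by
      have h := recA_nonneg inp 0 (by omega) (by simpa using hall)
      simpa using h
    rw [h0]
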